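-- pv_equiv track=rewrite | github.com/JeongMyeongHong/DailyAlgorithm | 프로그래머스/0/181913. 문자열 여러 번 뒤집기/문자열 여러 번 뒤집기.py | reverse_function
-- ===== SOURCE A (Python) =====
-- import copy
--
-- def reverse_function(my_string, query):
--     s = query[0]
--     e = query[1] + 1
--     my_string = list(my_string)
--     res = copy.deepcopy(my_string)
--     for (idx, i) in enumerate(range(s, e)):
--         res[i] = my_string[e - idx - 1]
--     return ''.join(res)
-- ===== SOURCE B (Python) =====
-- def reverse_function(my_string, query):
--     s, e = query[0], query[1] + 1
--     if s >= e:
--         return my_string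
--     return my_string[:s] + my_string[s:e][::-1] + my_string[e:]
-- ===== Notes on version B (the rewrite author's own statement) =====
-- stated objective: simpler
-- what changed: Replaced copy.deepcopy plus an enumerate/range loop of indexed writes with a concatenation of three slices whose middle slice is reversed (empty ranges returned unchanged).
-- outside the precondition, e.g. on reverse_function('abcd', [-3, 2]): A returns 'dcba', B returns 'acbd'
import Mathlib
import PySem

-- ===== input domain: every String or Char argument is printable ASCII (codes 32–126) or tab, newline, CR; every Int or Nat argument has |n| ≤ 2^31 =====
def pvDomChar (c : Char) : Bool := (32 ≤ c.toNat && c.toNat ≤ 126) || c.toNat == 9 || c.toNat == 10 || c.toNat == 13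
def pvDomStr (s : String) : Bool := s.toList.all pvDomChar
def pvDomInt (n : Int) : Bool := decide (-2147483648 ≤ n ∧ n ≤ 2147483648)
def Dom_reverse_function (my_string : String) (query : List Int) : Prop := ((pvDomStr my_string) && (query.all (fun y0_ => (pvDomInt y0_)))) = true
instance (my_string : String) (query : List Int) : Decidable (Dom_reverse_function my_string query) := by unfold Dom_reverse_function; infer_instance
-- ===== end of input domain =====

-- B replaces A's copy + enumerate/range loop of indexed writes by three slices with the middle reversed,
-- returning the string unchanged on an empty range (simpler); equivalence is claimed on Pre_: queries of
-- length ≥ 2 whose range is empty (query[1]+1 ≤ query[0]) or lies inside [0, len(my_string)).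

-- ===== PORT A =====
-- transliteration of A: s = query[0]; e = query[1]+1; res = copy of list(my_string);
-- for (idx, i) in enumerate(range(s, e)): res[i] = my_string[e - idx - 1]; return ''.join(res)
def reverse_function (my_string : String) (query : List Int) : String :=
  match PySem.List.pyGet? query 0, PySem.List.pyGet? query 1 with
  | some s, some q1 =>
    let e := q1 + 1
    let ms := my_string.toList
    let res := ms   -- copy.deepcopy(my_string)
    let res := (PySem.List.enumerate (PySem.List.pyRange s e 1) 0).foldl
      (fun r p => PySem.List.pySetD r p.2 (PySem.List.pyGetD ms (e - p.1 - 1) ' ')) res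
    String.ofList res   -- ''.join(res) over a list of chars
  | _, _ => ""          -- query[0] / query[1] raises IndexError: outside Pre_

-- ===== PORT B =====
-- transliteration of B: if s >= e: return my_string; else my_string[:s] + my_string[s:e][::-1] + my_string[e:]
def reverse_function_alt (my_string : String) (query : List Int) : String :=
  match PySem.List.pyGet? query 0 with
  | none => ""            -- query[0] raises IndexError: outside Pre_
  | some s =>
    match PySem.List.pyGet? query 1 with
    | none => ""
    | some q1 =>
      let e := q1 + 1
      if e ≤ s then my_string
      else
        let cs := my_string.toList
        String.ofList (PySem.List.slice cs none (some s)
          ++ (PySem.List.slice cs (some s) (some e)).reverse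
          ++ PySem.List.slice cs (some e) none)

-- ===== PRECONDITION & SPEC =====
-- Pre_ excludes: queries with fewer than 2 elements (A raises IndexError), and non-empty ranges whose
-- start or inclusive end lies outside [0, len): there A raises IndexError or relies on Python
-- negative-index wraparound, a corner no caller of an inclusive-range reverse specifies.
def Pre_reverse_function (my_string : String) (query : List Int) : Prop :=
  2 ≤ query.length ∧
  (PySem.List.pyGetD query 1 0 + 1 ≤ PySem.List.pyGetD query 0 0 ∨
    (0 ≤ PySem.List.pyGetD query 0 0 ∧
     PySem.List.pyGetD query 1 0 < (my_string.toList.length : Int)))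
instance (my_string : String) (query : List Int) : Decidable (Pre_reverse_function my_string query) := by
  unfold Pre_reverse_function; infer_instance

def pvWitness_reverse_function : String × List Int := ("hello", [1, 3])

def Spec_reverse_function (my_string : String) (query : List Int) (out : String) : Prop := out = reverse_function_alt my_string query
instance (my_string : String) (query : List Int) (out : String) : Decidable (Spec_reverse_function my_string query out) := by unfold Spec_reverse_function; infer_instance

-- ===== CLAIM (what is proved, stated in full; the proofs are below) =====
def Claim_equal_reverse_function : Prop := ∀ (my_string : String) (query : List Int), Dom_reverse_function my_string query → Pre_reverse_function my_string query → Spec_reverse_function my_string query (reverse_function my_string query)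

-- ===== LEMMAS AND PROOFS =====

lemma pyGet?_cons_zero {α : Type} (a : α) (xs : List α) : PySem.List.pyGet? (a::xs) 0 = some a := by
  simp [PySem.List.pyGet?, PySem.List.pyIdx?]

lemma pyGet?_cons_one {α : Type} (a b : α) (t : List α) : PySem.List.pyGet? (a::b::t) 1 = some b := by
  simp [PySem.List.pyGet?, PySem.List.pyIdx?]

-- A's loop writes res[i] := ms[s0+e0-1-i] for i in [s0+k, e0); characterised pointwise.
lemma loopA_go (ms : List Char) (s0 e0 : Nat) (hE : e0 ≤ ms.length) :
    ∀ (n k : Nat) (res : List Char), res.length = ms.length → s0 + k + n = e0 →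
      ∀ j : Nat,
      ((PySem.List.enumerate (PySem.List.pyRange ((s0 + k : Nat) : Int) ((e0 : Nat) : Int) 1) (k : Int)).foldl
        (fun r p => PySem.List.pySetD r p.2 (PySem.List.pyGetD ms (((e0 : Nat) : Int) - p.1 - 1) ' ')) res)[j]?
      = if s0 + k ≤ j ∧ j < e0 then ms[s0 + e0 - 1 - j]? else res[j]? := by
  intro n
  induction n with
  | zero =>
    intro k res hlen hke j
    have hrange : PySem.List.pyRange ((s0 + k : Nat) : Int) ((e0 : Nat) : Int) 1 = [] := by
      simp [PySem.List.pyRange]; omega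
    rw [hrange]
    simp only [PySem.List.enumerate, List.foldl_nil]
    rw [if_neg (by omega)]
  | succ n ih =>
    intro k res hlen hke j
    have hlt : ((s0 + k : Nat) : Int) < ((e0 : Nat) : Int) := by push_cast; omega
    rw [PySem.List.pyRange_one_cons hlt, PySem.List.enumerate_cons, List.foldl_cons]
    have hidx : (((e0 : Nat) : Int) - (k : Int) - 1) = (((e0 - k - 1 : Nat)) : Int) := by omega
    have hcast1 : ((s0 + k : Nat) : Int) + 1 = ((s0 + (k + 1) : Nat) : Int) := by push_cast; omega
    have hcast2 : ((k : Nat) : Int) + 1 = (((k + 1 : Nat)) : Int) := by norm_cast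
    have hred : PySem.List.pySetD res (((k : Int), ((s0 + k : Nat) : Int)).2) (PySem.List.pyGetD ms (((e0 : Nat) : Int) - ((k : Int), ((s0 + k : Nat) : Int)).1 - 1) ' ') = res.set (s0 + k) (ms.getD (e0 - k - 1) ' ') := by
      show PySem.List.pySetD res ((s0 + k : Nat) : Int) (PySem.List.pyGetD ms (((e0 : Nat) : Int) - (k : Int) - 1) ' ') = _
      rw [hidx, PySem.List.pyGetD_natCast, PySem.List.pySetD_natCast]
    rw [hred, hcast1, hcast2]
    rw [ih (k + 1) _ (by rw [List.length_set]; exact hlen) (by omega) j]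
    rw [List.getElem?_set]
    have hms : ms.getD (e0 - k - 1) ' ' = ms[e0 - k - 1] := by
      rw [List.getD_eq_getElem?_getD, List.getElem?_eq_getElem (by omega)]; rfl
    by_cases h1 : s0 + k = j
    · -- the element written this step
      rw [if_neg (by omega), if_pos (by omega), if_pos (by omega), if_pos (by omega), hms,
          show s0 + e0 - 1 - j = e0 - k - 1 from by omega,
          List.getElem?_eq_getElem (by omega)]
    · rw [if_neg h1]
      by_cases h2 : s0 + (k + 1) ≤ j ∧ j < e0
      · rw [if_pos h2, if_pos (by omega)]
      · rw [if_neg h2, if_neg (by omega)]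

-- B's three-segment concatenation, characterised pointwise.
lemma three_seg_get (cs : List Char) (sn en : Nat) (hse : sn ≤ en) (hel : en ≤ cs.length) (j : Nat) :
    (cs.take sn ++ ((cs.drop sn).take (en - sn)).reverse ++ cs.drop en)[j]?
    = if sn ≤ j ∧ j < en then cs[sn + en - 1 - j]? else cs[j]? := by
  have hmidlen : ((cs.drop sn).take (en - sn)).length = en - sn := by
    simp [List.length_take, List.length_drop]; omega
  rw [List.append_assoc, List.getElem?_append]
  by_cases h1 : j < sn
  · rw [if_pos (by simpa [List.length_take] using by omega : j < (cs.take sn).length)]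
    rw [List.getElem?_take, if_pos h1, if_neg (by omega)]
  · rw [if_neg (by simp [List.length_take]; omega)]
    have htlen : (cs.take sn).length = sn := by simp [List.length_take]; omega
    rw [htlen, List.getElem?_append]
    by_cases h2 : j < en
    · rw [if_pos (by rw [List.length_reverse, hmidlen]; omega)]
      rw [List.getElem?_reverse (by rw [hmidlen]; omega), hmidlen]
      rw [List.getElem?_take, if_pos (by omega), List.getElem?_drop]
      rw [if_pos (by omega)]
      congr 1
      omega
    · rw [if_neg (by rw [List.length_reverse, hmidlen]; omega)]
      rw [List.length_reverse, hmidlen, List.getElem?_drop]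
      rw [if_neg (by omega)]
      congr 1
      omega

-- ===== VERDICT (by name: the statement is the Claim_ definition above) =====
theorem reverse_function_spec : Claim_equal_reverse_function := by
  intro my_string query hdom hpre
  unfold Spec_reverse_function
  obtain ⟨hlen2, hpre2⟩ := hpre
  match query, hlen2 with
  | a :: b :: t, _ =>
  simp only [PySem.List.pyGetD, pyGet?_cons_zero, pyGet?_cons_one, Option.getD_some] at hpre2
  unfold reverse_function reverse_function_alt
  rw [pyGet?_cons_zero, pyGet?_cons_one]
  dsimp only
  by_cases hemp : b + 1 ≤ a
  · -- empty range: A's loop does nothing, B returns my_string unchanged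
    have hr : PySem.List.pyRange a (b + 1) 1 = [] := by
      simp [PySem.List.pyRange]; omega
    rw [hr, if_pos hemp]
    simp only [PySem.List.enumerate_nil, List.foldl_nil]
    exact String.ofList_toList
  · obtain ⟨h0, h1len⟩ : 0 ≤ a ∧ b < (my_string.toList.length : Int) := hpre2.resolve_left hemp
    rw [if_neg (by omega)]
    obtain ⟨sn, rfl⟩ : ∃ sn : Nat, a = (sn : Int) := ⟨a.toNat, by omega⟩
    obtain ⟨en, hen⟩ : ∃ en : Nat, b + 1 = (en : Int) := ⟨(b + 1).toNat, by omega⟩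
    have hse : sn ≤ en := by omega
    have hel : en ≤ my_string.toList.length := by omega
    simp only [hen]
    congr 1
    apply List.ext_getElem?
    intro j
    have hA := loopA_go my_string.toList sn en hel (en - sn) 0 my_string.toList rfl (by omega) j
    simp only [Nat.add_zero, Nat.cast_zero] at hA
    rw [hA]
    rw [PySem.List.slice_to_natCast, PySem.List.slice_natCast, PySem.List.slice_from_natCast]
    rw [three_seg_get my_string.toList sn en hse hel j]
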